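-- pv_equiv track=rewrite | github.com/nastyafunkner/symptom_detection | symptom_detection/SymptomDetection.py | remove_repeats
-- ===== SOURCE A (Python) =====
-- def remove_repeats(detections):
--     these_dets = sorted(detections, key=lambda x: len(x[1]))
--     index_to_remove = []
--     for i, det in enumerate(these_dets):
--         for j, bigger_det in enumerate(these_dets[i + 1:], i + 1):
--             if i in index_to_remove:
--                 break
--             if det[1] in bigger_det[1]:
--                 index_to_remove.append(i)
--     for indexx in index_to_remove[::-1]:
--         del these_dets[indexx]
--     return these_dets
-- ===== SOURCE B (Python) =====
-- def remove_repeats(detections):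
--     these_dets = sorted(detections, key=lambda x: len(x[1]))
--     kept = []
--     for det in reversed(these_dets):
--         if not any(det[1] in k[1] for k in kept):
--             kept.append(det)
--     kept.reverse()
--     return kept
-- ===== Notes on version B (the rewrite author's own statement) =====
-- stated objective: simpler
-- what changed: Instead of marking indices of contained detections in a nested scan and then deleting them one by one, B walks the sorted list longest-first keeping a detection only if no already-kept detection contains it (correct by transitivity of substring containment), then reverses the kept list.
import Mathlib
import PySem

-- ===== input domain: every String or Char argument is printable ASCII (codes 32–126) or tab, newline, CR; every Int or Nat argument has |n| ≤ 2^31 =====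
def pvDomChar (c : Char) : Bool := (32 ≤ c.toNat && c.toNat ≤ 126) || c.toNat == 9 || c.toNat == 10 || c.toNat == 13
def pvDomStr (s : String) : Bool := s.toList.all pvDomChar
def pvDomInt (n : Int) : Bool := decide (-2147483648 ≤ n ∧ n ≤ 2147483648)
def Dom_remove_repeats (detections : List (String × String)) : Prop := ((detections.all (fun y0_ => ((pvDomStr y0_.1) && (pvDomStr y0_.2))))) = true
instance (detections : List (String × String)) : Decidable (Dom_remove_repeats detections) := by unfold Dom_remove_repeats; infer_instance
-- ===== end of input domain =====

-- B replaces A's index-marking passes and deletion loop by a single longest-first scan that keeps a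
-- detection iff no already-kept detection contains it (same output by transitivity of substring containment; simpler decomposition).

-- ===== PORT A =====
-- inner loop 'for j, bigger_det in enumerate(these_dets[i+1:], i+1)': the enumerate index j is unused
-- by the body; 'break' is modeled by the state being left unchanged once i has been appended.
def pvInnerA (det : String × String) (i : Int) (itr : List Int)
    (rest : List (String × String)) : List Int :=
  match rest with
  | [] => itr
  | bigger_det :: t =>
    if i ∈ itr then itr
    else if PySem.Str.isIn det.2 bigger_det.2 then pvInnerA det i (itr ++ [i]) t
    else pvInnerA det i itr t

def remove_repeats (detections : List (String × String)) : List (String × String) :=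
  let these_dets := PySem.List.sorted detections (fun x => PySem.Str.len x.2) false
  let index_to_remove : List Int :=
    (PySem.List.enumerate these_dets 0).foldl
      (fun itr p => pvInnerA p.2 p.1 itr (PySem.List.slice these_dets (some (p.1 + 1)) none)) []
  -- index_to_remove[::-1] (step -1 is never none); 'del these_dets[indexx]' on the nonnegative
  -- in-range indices produced by enumerate is exactly List.eraseIdx
  ((PySem.List.slice? index_to_remove none none (-1)).getD []).foldl
    (fun l indexx => l.eraseIdx indexx.toNat) these_dets

-- ===== PORT B =====
def remove_repeats_alt (detections : List (String × String)) : List (String × String) :=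
  let these_dets := PySem.List.sorted detections (fun x => PySem.Str.len x.2) false
  let kept := these_dets.reverse.foldl
    (fun kept det =>
      if kept.any (fun k => PySem.Str.isIn det.2 k.2) then kept else kept ++ [det]) []
  kept.reverse

-- ===== PRECONDITION & SPEC =====
def Spec_remove_repeats (detections : List (String × String)) (out : List (String × String)) : Prop := out = remove_repeats_alt detections
instance (detections : List (String × String)) (out : List (String × String)) : Decidable (Spec_remove_repeats detections out) := by unfold Spec_remove_repeats; infer_instance

-- ===== CLAIM (what is proved, stated in full; the proofs are below) =====
def Claim_equal_remove_repeats : Prop := ∀ (detections : List (String × String)), Dom_remove_repeats detections → Spec_remove_repeats detections (remove_repeats detections)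

-- ===== LEMMAS AND PROOFS =====

-- substring containment test, and the per-index removal condition of A on the sorted list L
def pvC (x y : String × String) : Bool := PySem.Str.isIn x.2 y.2

def pvQ (L : List (String × String)) (i : Nat) : Bool :=
  (L.drop (i + 1)).any (fun y => pvC (L[i]!) y)

-- the common right-recursive form both ports are reduced to
def pvG : List (String × String) → List (String × String)
  | [] => []
  | x :: t => if (pvG t).any (fun k => pvC x k) then pvG t else x :: pvG t

-- A's keep-condition, stated on suffixes
def pvSpec : List (String × String) → List (String × String)
  | [] => []
  | x :: t => if t.any (fun y => pvC x y) then pvSpec t else x :: pvSpec t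

theorem pvC_trans {a b c : String × String} (h1 : pvC a b = true) (h2 : pvC b c = true) :
    pvC a c = true := by
  simp only [pvC, PySem.Str.isIn_iff_infix] at *
  exact h1.trans h2

theorem any_pvG (x : String × String) (t : List (String × String)) :
    t.any (fun y => pvC x y) = (pvG t).any (fun y => pvC x y) := by
  induction t with
  | nil => rfl
  | cons y t' ih =>
    simp only [pvG, List.any_cons]
    by_cases h : (pvG t').any (fun k => pvC y k) = true
    · rw [if_pos h]
      rcases Bool.eq_false_or_eq_true (pvC x y) with hxy | hxy
      · have hany : (pvG t').any (fun y => pvC x y) = true := by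
          obtain ⟨k, hk, hyk⟩ := List.any_eq_true.mp h
          exact List.any_eq_true.mpr ⟨k, hk, pvC_trans hxy hyk⟩
        rw [hxy, Bool.true_or, hany]
      · rw [hxy, Bool.false_or]; exact ih
    · rw [if_neg h, List.any_cons, ih]

theorem pvSpec_eq_pvG (l : List (String × String)) : pvSpec l = pvG l := by
  induction l with
  | nil => rfl
  | cons x t ih =>
    unfold pvSpec pvG
    rw [any_pvG, ih]

-- B's fold over the reversed list builds (pvG l).reverse
theorem foldB_reverse (l : List (String × String)) :
    l.reverse.foldl
      (fun kept det =>
        if kept.any (fun k => PySem.Str.isIn det.2 k.2) then kept else kept ++ [det]) []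
    = (pvG l).reverse := by
  induction l with
  | nil => rfl
  | cons x t ih =>
    rw [List.reverse_cons, List.foldl_append, ih]
    simp only [List.foldl_cons, List.foldl_nil, pvG]
    have : ((pvG t).reverse.any (fun k => PySem.Str.isIn x.2 k.2))
        = (pvG t).any (fun k => pvC x k) := by simp [pvC]
    rw [this]
    by_cases h : (pvG t).any (fun k => pvC x k) = true
    · simp [h]
    · simp [h, List.reverse_cons]

-- inner loop: once i is already marked, nothing happens
theorem pvInnerA_mem (det : String × String) (i : Int) (itr : List Int)
    (rest : List (String × String)) (h : i ∈ itr) : pvInnerA det i itr rest = itr := by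
  induction rest with
  | nil => rfl
  | cons b t ih => simp [pvInnerA, h]

-- inner loop: if i is not yet marked, it gets appended iff some element of rest contains det
theorem pvInnerA_eq (det : String × String) (i : Int) (itr : List Int)
    (rest : List (String × String)) (h : i ∉ itr) :
    pvInnerA det i itr rest
      = if rest.any (fun y => pvC det y) then itr ++ [i] else itr := by
  induction rest with
  | nil => rfl
  | cons b t ih =>
    simp only [pvInnerA]
    rw [if_neg h]
    by_cases hb : PySem.Str.isIn det.2 b.2 = true
    · rw [if_pos hb, pvInnerA_mem det i _ t (by simp)]
      have hany : ((b :: t).any fun y => pvC det y) = true := by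
        simp only [List.any_cons]
        rw [show pvC det b = true from hb, Bool.true_or]
      rw [if_pos hany]
    · rw [if_neg hb, ih]
      simp only [List.any_cons, show pvC det b = false from by simpa [pvC] using hb,
        Bool.false_or]

-- outer loop invariant: after processing the enumerate tail starting at k,
-- index_to_remove is the ascending list of marked indices (as Ints)
theorem outerA (L : List (String × String)) :
    ∀ (m : List (String × String)) (k : Nat) (itr : List Int),
    (∀ x ∈ itr, ∃ j : Nat, j < k ∧ x = (j : Int)) →
    m = L.drop k →
    (PySem.List.enumerate m (k : Int)).foldl
        (fun itr p => pvInnerA p.2 p.1 itr (PySem.List.slice L (some (p.1 + 1)) none)) itr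
      = itr ++ ((List.range' k (L.length - k)).filter (pvQ L)).map (fun j => Int.ofNat j) := by
  intro m
  induction m with
  | nil =>
    intro k itr _ hm
    have hk : L.length ≤ k := by
      by_contra hlt
      push_neg at hlt
      have := List.drop_eq_nil_iff.mp hm.symm
      omega
    have : L.length - k = 0 := by omega
    simp [PySem.List.enumerate, this]
  | cons d m' ih =>
    intro k itr hitr hm
    have hkn : k < L.length := by
      by_contra hge
      push_neg at hge
      rw [List.drop_eq_nil_of_le hge] at hm
      exact List.cons_ne_nil d m' hm
    have hd : L[k]! = d := by
      have : L[k]? = some d := by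
        rw [← List.head?_drop, ← hm]
        rfl
      rw [getElem!_pos L k hkn]
      rw [List.getElem?_eq_getElem hkn] at this
      exact Option.some.inj this
    have hm' : m' = L.drop (k + 1) := by
      have := congrArg List.tail hm
      simpa [List.tail_drop] using this
    rw [PySem.List.enumerate_cons, List.foldl_cons]
    have hslice : PySem.List.slice L (some ((k : Int) + 1)) none = L.drop (k + 1) := by
      have := PySem.List.slice_from_natCast L (k + 1)
      push_cast at this ⊢
      exact this
    have hnotmem : (k : Int) ∉ itr := by
      intro hmem
      obtain ⟨j, hj, hx⟩ := hitr _ hmem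
      omega
    have hstep : pvInnerA d (k : Int) itr (PySem.List.slice L (some ((k : Int) + 1)) none)
        = itr ++ (if pvQ L k then [(k : Int)] else []) := by
      rw [hslice, pvInnerA_eq d (k : Int) itr _ hnotmem]
      simp only [pvQ, hd]
      by_cases hq : (L.drop (k + 1)).any (fun y => pvC d y) = true
      · simp [hq]
      · simp [hq]
    rw [hstep]
    have hitr' : ∀ x ∈ itr ++ (if pvQ L k then [(k : Int)] else []),
        ∃ j : Nat, j < k + 1 ∧ x = (j : Int) := by
      intro x hx
      rcases List.mem_append.mp hx with hx | hx
      · obtain ⟨j, hj, rfl⟩ := hitr x hx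
        exact ⟨j, by omega, rfl⟩
      · refine ⟨k, by omega, ?_⟩
        by_cases hq : pvQ L k <;> simp [hq] at hx <;> simp [hx]
    have := ih (k + 1) (itr ++ (if pvQ L k then [(k : Int)] else [])) hitr' hm'
    push_cast at this ⊢
    rw [this]
    have hrange : List.range' k (L.length - k) = k :: List.range' (k + 1) (L.length - (k + 1)) := by
      have h1 : L.length - k = (L.length - (k + 1)) + 1 := by omega
      rw [h1, List.range'_succ]
    rw [hrange, List.filter_cons]
    by_cases hq : pvQ L k = true
    · simp [hq, List.append_assoc]
    · simp [hq]

-- deleting a descending in-range index list is keeping the unmarked positions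
theorem delA {α : Type} [Inhabited α] (P : Nat → Bool) :
    ∀ (m : Nat) (l : List α), m ≤ l.length →
    (((List.range m).filter P).reverse).foldl (fun acc i => acc.eraseIdx i) l
      = (((List.range m).filter (fun i => !P i)).map (fun i => l[i]!)) ++ l.drop m := by
  intro m
  induction m with
  | zero => intro l _; simp
  | succ m ih =>
    intro l hml
    rw [List.range_succ, List.filter_append, List.filter_append, List.reverse_append,
      List.foldl_append]
    by_cases hp : P m = true
    · have hfoldm : (List.filter P [m]).reverse.foldl (fun acc i => acc.eraseIdx i) l
          = l.eraseIdx m := by simp [hp]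
      rw [hfoldm, ih (l.eraseIdx m) (by rw [List.length_eraseIdx_of_lt (by omega)]; omega)]
      have hget : ∀ i ∈ (List.range m).filter (fun i => !P i),
          (l.eraseIdx m)[i]! = l[i]! := by
        intro i hi
        have him : i < m := List.mem_range.mp (List.mem_filter.mp hi).1
        rw [getElem!_pos (l.eraseIdx m) i
            (by rw [List.length_eraseIdx_of_lt (by omega)]; omega),
          getElem!_pos l i (by omega)]
        exact List.getElem_eraseIdx_of_lt (by rw [List.length_eraseIdx_of_lt (by omega)]; omega) him
      rw [List.map_congr_left hget]
      have hdrop : (l.eraseIdx m).drop m = l.drop (m + 1) := by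
        rw [List.eraseIdx_eq_take_drop_succ]
        exact List.drop_left' (by simp [List.length_take]; omega)
      rw [hdrop]
      simp [hp]
    · have hp' : P m = false := by simpa using hp
      have hfoldm : (List.filter P [m]).reverse.foldl (fun acc i => acc.eraseIdx i) l = l := by
        simp [hp']
      rw [hfoldm, ih l (by omega)]
      have hdm : l.drop m = l[m]! :: l.drop (m + 1) := by
        rw [getElem!_pos l m (by omega)]
        exact List.drop_eq_getElem_cons (by omega)
      simp [hp', hdm]

-- the unmarked positions, read off in order, are exactly pvSpec of the suffix
theorem keep_eq_pvSpec (L : List (String × String)) :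
    ∀ (ms : List (String × String)) (k : Nat), ms = L.drop k →
    (((List.range' k (L.length - k)).filter (fun i => !pvQ L i)).map (fun i => L[i]!))
      = pvSpec ms := by
  intro ms
  induction ms with
  | nil =>
    intro k hm
    have hk : L.length ≤ k := by
      by_contra hlt
      push_neg at hlt
      have := List.drop_eq_nil_iff.mp hm.symm
      omega
    have : L.length - k = 0 := by omega
    simp [this, pvSpec]
  | cons x t ihh =>
    intro k hm
    have hkn : k < L.length := by
      by_contra hge
      push_neg at hge
      rw [List.drop_eq_nil_of_le hge] at hm
      exact List.cons_ne_nil x t hm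
    have hx : L[k]! = x := by
      have : L[k]? = some x := by
        rw [← List.head?_drop, ← hm]
        rfl
      rw [getElem!_pos L k hkn]
      rw [List.getElem?_eq_getElem hkn] at this
      exact Option.some.inj this
    have ht : t = L.drop (k + 1) := by
      have := congrArg List.tail hm
      simpa [List.tail_drop] using this
    have hrange : List.range' k (L.length - k) = k :: List.range' (k + 1) (L.length - (k + 1)) := by
      have h1 : L.length - k = (L.length - (k + 1)) + 1 := by omega
      rw [h1, List.range'_succ]
    have hq : pvQ L k = t.any (fun y => pvC x y) := by
      simp [pvQ, hx, ht]
    rw [hrange, List.filter_cons]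
    by_cases hqk : pvQ L k = true
    · rw [if_neg (show ¬((!pvQ L k) = true) from by rw [hqk]; simp)]
      rw [ihh (k + 1) ht]
      have hs : pvSpec (x :: t) = pvSpec t := by
        simp only [pvSpec]
        rw [← hq, hqk, if_pos rfl]
      rw [hs]
    · have hqf : pvQ L k = false := by simpa using hqk
      rw [if_pos (show (!pvQ L k) = true from by rw [hqf]; rfl)]
      rw [List.map_cons, ihh (k + 1) ht, hx]
      have hs : pvSpec (x :: t) = x :: pvSpec t := by
        simp only [pvSpec]
        rw [← hq, hqf, if_neg (by simp)]
      rw [hs]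

-- A's pipeline on the sorted list computes pvSpec
theorem portA_eq (L : List (String × String)) :
    (((PySem.List.slice? ((PySem.List.enumerate L 0).foldl
        (fun itr p => pvInnerA p.2 p.1 itr (PySem.List.slice L (some (p.1 + 1)) none)) [])
        none none (-1)).getD []).foldl (fun l indexx => l.eraseIdx indexx.toNat) L)
      = pvSpec L := by
  have houter := outerA L L 0 [] (by simp) (by simp)
  simp only [Nat.cast_zero] at houter
  rw [houter]
  rw [PySem.List.slice?_none_none_neg_one]
  simp only [Option.getD_some, List.nil_append]
  rw [← List.map_reverse, List.foldl_map]
  have hsteps : (fun (acc : List (String × String)) (i : Nat) => acc.eraseIdx (Int.ofNat i).toNat)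
      = fun acc i => acc.eraseIdx i := by
    funext acc i
    simp
  rw [hsteps, Nat.sub_zero, ← List.range_eq_range',
    delA (pvQ L) L.length L (le_refl _),
    List.drop_length, List.append_nil, List.range_eq_range']
  have hk := keep_eq_pvSpec L L 0 (by simp)
  simpa using hk

-- ===== VERDICT (by name: the statement is the Claim_ definition above) =====
theorem remove_repeats_spec : Claim_equal_remove_repeats := by
  intro detections _
  unfold Spec_remove_repeats
  show remove_repeats detections = remove_repeats_alt detections
  simp only [remove_repeats, remove_repeats_alt]
  rw [foldB_reverse, List.reverse_reverse, ← pvSpec_eq_pvG]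
  exact portA_eq _
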